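-- pv_equiv track=rewrite | github.com/CassianoJunior/nondeterministic-finite-automaton | nfa.py | highlightSymbolInWord
-- ===== SOURCE A (Python) =====
-- def highlightSymbolInWord(word, index):
--   highlightedWord = ''
--   for i in range(len(word)):
--     if i == index:
--       highlightedWord += f'\033[1;31m|{word[i]}|\033[0;0m'
--     else:
--       highlightedWord += word[i]
--
--   return highlightedWord
-- ===== SOURCE B (Python) =====
-- def highlightSymbolInWord(word, index):
--   if 0 <= index < len(word):
--     return word[:index] + '\033[1;31m|' + word[index] + '|\033[0;0m' + word[index+1:]
--   return word
-- ===== Notes on version B (the rewrite author's own statement) =====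
-- stated objective: simpler
-- what changed: Replaces the index-by-index accumulation loop with a single guarded three-way slice concatenation (prefix + highlighted char + suffix), no loop at all.
import Mathlib
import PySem

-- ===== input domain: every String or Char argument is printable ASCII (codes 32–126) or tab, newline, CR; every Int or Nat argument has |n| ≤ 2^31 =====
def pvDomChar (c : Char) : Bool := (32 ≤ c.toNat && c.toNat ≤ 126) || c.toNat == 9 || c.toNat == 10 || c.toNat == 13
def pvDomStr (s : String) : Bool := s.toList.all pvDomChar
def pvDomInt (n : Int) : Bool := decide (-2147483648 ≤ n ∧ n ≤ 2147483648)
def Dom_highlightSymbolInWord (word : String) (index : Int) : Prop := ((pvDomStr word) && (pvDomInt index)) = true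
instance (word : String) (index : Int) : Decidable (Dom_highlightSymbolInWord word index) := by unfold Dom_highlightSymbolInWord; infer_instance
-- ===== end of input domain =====

-- B replaces A's per-character accumulation loop by one guarded three-way slice
-- concatenation (prefix + highlighted char + suffix); objective: simpler.

-- ===== PORT A =====
-- the two ANSI escape chunks of the f-string '\033[1;31m|{c}|\033[0;0m'
def hlPre : List Char := "\x1b[1;31m|".toList
def hlPost : List Char := "|\x1b[0;0m".toList

-- for i in range(len(word)): if i == index: acc += '\033[1;31m|' + word[i] + '|\033[0;0m' else: acc += word[i]
def highlightSymbolInWord (word : String) (index : Int) : String :=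
  String.ofList ((PySem.List.pyRange 0 (word.toList.length : Int) 1).foldl
    (fun acc i =>
      if i = index then
        acc ++ (hlPre ++ [PySem.List.pyGetD word.toList i ' '] ++ hlPost)
      else
        acc ++ [PySem.List.pyGetD word.toList i ' ']) [])

-- ===== PORT B =====
-- if 0 <= index < len(word): word[:index] + '\033[1;31m|' + word[index] + '|\033[0;0m' + word[index+1:] else word
def highlightSymbolInWord_alt (word : String) (index : Int) : String :=
  if 0 ≤ index ∧ index < (word.toList.length : Int) then
    String.ofList (PySem.List.slice word.toList none (some index) ++ hlPre ++
      [PySem.List.pyGetD word.toList index ' '] ++ hlPost ++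
      PySem.List.slice word.toList (some (index + 1)) none)
  else word

-- ===== PRECONDITION & SPEC =====
def Spec_highlightSymbolInWord (word : String) (index : Int) (out : String) : Prop := out = highlightSymbolInWord_alt word index
instance (word : String) (index : Int) (out : String) : Decidable (Spec_highlightSymbolInWord word index out) := by unfold Spec_highlightSymbolInWord; infer_instance

-- ===== CLAIM (what is proved, stated in full; the proofs are below) =====
def Claim_equal_highlightSymbolInWord : Prop := ∀ (word : String) (index : Int), Dom_highlightSymbolInWord word index → Spec_highlightSymbolInWord word index (highlightSymbolInWord word index)

-- ===== LEMMAS AND PROOFS =====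

-- the per-position chunk of A's loop
def hlChunk (cs : List Char) (index i : Int) : List Char :=
  if i = index then hlPre ++ [PySem.List.pyGetD cs i ' '] ++ hlPost
  else [PySem.List.pyGetD cs i ' ']

-- A's loop over enumerate, shifted start, characterised in closed form
theorem flat_enumerate (cs : List Char) (index s : Int) :
    (PySem.List.enumerate cs s).flatMap
      (fun p => if p.1 = index then hlPre ++ [p.2] ++ hlPost else [p.2]) =
    if s ≤ index ∧ index < s + (cs.length : Int) then
      cs.take (index - s).toNat ++ hlPre ++ [cs.getD (index - s).toNat ' '] ++ hlPost ++
        cs.drop ((index - s).toNat + 1)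
    else cs := by
  induction cs generalizing s with
  | nil => simp [PySem.List.enumerate_nil]
  | cons c cs ih =>
    rw [PySem.List.enumerate_cons, List.flatMap_cons, ih]
    dsimp only
    simp only [List.length_cons, Nat.cast_add, Nat.cast_one]
    split_ifs with hs hin hout hin hout hout <;>
      first
        | (exfalso; omega)
        | (have h0 : (index - s).toNat = 0 := by omega
           simp [h0])
        | (have hk : (index - s).toNat = (index - (s + 1)).toNat + 1 := by omega
           simp [hk, List.getD])
        | simp

-- enumerate cs 0 written as indexing over List.range
theorem enumerate_eq_range (cs : List Char) :
    PySem.List.enumerate cs 0 = (List.range cs.length).map (fun (k : Nat) => ((k : Int), cs.getD k ' ')) := by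
  apply List.ext_getElem
  · simp [PySem.List.length_enumerate]
  · intro k h1 h2
    have hk : k < cs.length := by simpa [PySem.List.length_enumerate] using h1
    rw [PySem.List.getElem_enumerate]
    simp [List.getD, hk]

theorem highlightSymbolInWord_spec : Claim_equal_highlightSymbolInWord := by
  intro word index _
  unfold Spec_highlightSymbolInWord highlightSymbolInWord highlightSymbolInWord_alt
  set cs := word.toList with hcs
  -- turn the fold into a flatMap over indices
  rw [PySem.List.foldl_congr_mem _
      (fun acc i =>
        if i = index then acc ++ (hlPre ++ [PySem.List.pyGetD cs i ' '] ++ hlPost)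
        else acc ++ [PySem.List.pyGetD cs i ' '])
      (fun acc i => acc ++ hlChunk cs index i) []
      (by intro acc i _; by_cases h : i = index <;> simp [hlChunk, h])]
  rw [PySem.List.foldl_append_eq_flatMap]
  rw [PySem.List.pyRange_zero_natCast, List.flatMap_map]
  have key : (List.range cs.length).flatMap (fun (a : Nat) => hlChunk cs index (a : Int)) =
      (PySem.List.enumerate cs 0).flatMap
        (fun p => if p.1 = index then hlPre ++ [p.2] ++ hlPost else [p.2]) := by
    rw [enumerate_eq_range, List.flatMap_map]
    refine List.flatMap_congr ?_
    intro k hk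
    simp [hlChunk, PySem.List.pyGetD_natCast]
  rw [key, flat_enumerate]
  by_cases h : 0 ≤ index ∧ index < (cs.length : Int)
  · have h' : (0:Int) ≤ index ∧ index < 0 + (cs.length : Int) := by omega
    rw [if_pos h', if_pos h]
    have hlt : index.toNat < cs.length := by omega
    rw [PySem.List.slice_to cs h.1, PySem.List.slice_from cs (by omega : (0:Int) ≤ index + 1)]
    have ht : (index + 1).toNat = index.toNat + 1 := by omega
    rw [PySem.List.pyGetD_eq_getElem cs ' ' h.1 h.2, ht]
    simp [List.getD, hlt]
  · have h' : ¬ ((0:Int) ≤ index ∧ index < 0 + (cs.length : Int)) := by omega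
    rw [if_neg h', if_neg h, hcs]
    simp
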